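-- pv_equiv track=rewrite | github.com/Prashant-Jonny/dark-mips32-decompiler | src/main/test/java/se/filipallberg/dark/mips32decompiler/instruction/validation-test-generator.py | get_instruction_name
-- ===== SOURCE A (Python) =====
-- def get_instruction_name(enum: str) -> str:
--     """
--     Expects that the name of the enum starts at the first
--     character of the supplied string. Will return the name
--     of that particular enum.
--
--     >>> get_instruction_name("ADDU(0, 0x21,")
--     'ADDU'
--
--     Comments and whitespace are ignored, this is important as
--     all declarations are indented.
--     >>> enum = (''
--     ... '    /**'
--     ... '     * Put the logical AND of registers rs and rt into register rd.'
--     ... '     * Is only valid if shamt is 0'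
--     ... '     */'
--     ... '    AND(0x00, 0x24,'
--     ... '        new Condition<RTypeInstruction, Integer>()'
--     ... '               .checkThat(Int::shamt).is(0x00),'
--     ... '        new MnemonicPattern<>('
--     ... '               Str::iname, Str::rd,  Str::rs,  Str::rt)),')
--     >>> get_instruction_name(enum)
--     'AND'
--
--     Parentheses in Javadoc are ignored
--     >>> enum = (''
--     ... '    /**'
--     ... '     * Move from coprocessor 0. Move register rd in a coprocessor (register'
--     ... '     * fs in the FPU) to CPU register rt. The floating-point unit is'
--     ... '     * coprocessor 1.'
--     ... '     */'
--     ... '    // TODO: Validate that rs, shamt, and funct is 0'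
--     ... '    MFC0(0x10, 0x00, new Condition<RTypeInstruction, Integer>()'
--     ... '            .checkThat(Int::rs).is(0x00).'
--     ... '                    andThat(Int::shamt).is(0x00).'
--     ... '                    andThat(Int::funct).is(0x00),'
--     ... '            new MnemonicPattern<>(Str::iname, Str::rt,  Str::rd)),')
--     >>> get_instruction_name(enum)
--     'MFC0'
--     """
--     # The first character in the supplied string is the
--     # first character in the enum name. Then the end
--     # of the name is marked by the first parentheses
--     # in the string.
--     read_from_index = -2
--     if '*/' in enum:
--         # The enum is Javadoc'ed :) Ignore all characters above and
--         # including the comment end marker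
--         read_from_index = enum.index('*/')
--
--     lines = enum[read_from_index+2:].split()
--     for line in lines:
--         if '(' in line:
--             # We've found the start of the declaration
--             return line[:line.find('(')]
--
--     return ''
-- ===== SOURCE B (Python) =====
-- def get_instruction_name(enum: str) -> str:
--     i = enum.find('*/')
--     s = enum[i + 2:] if i != -1 else enum
--     p = s.find('(')
--     if p == -1:
--         return ''
--     j = p
--     while j > 0 and not s[j - 1].isspace():
--         j -= 1
--     return s[j:p]
-- ===== Notes on version B (the rewrite author's own statement) =====
-- stated objective: simpler
-- what changed: B replaces A's whitespace-tokenize-then-scan-tokens loop with one str.find locating the first opening parenthesis followed by a short backward scan to the preceding whitespace, slicing the name out of the string directly instead of building the full token list.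
import Mathlib
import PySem

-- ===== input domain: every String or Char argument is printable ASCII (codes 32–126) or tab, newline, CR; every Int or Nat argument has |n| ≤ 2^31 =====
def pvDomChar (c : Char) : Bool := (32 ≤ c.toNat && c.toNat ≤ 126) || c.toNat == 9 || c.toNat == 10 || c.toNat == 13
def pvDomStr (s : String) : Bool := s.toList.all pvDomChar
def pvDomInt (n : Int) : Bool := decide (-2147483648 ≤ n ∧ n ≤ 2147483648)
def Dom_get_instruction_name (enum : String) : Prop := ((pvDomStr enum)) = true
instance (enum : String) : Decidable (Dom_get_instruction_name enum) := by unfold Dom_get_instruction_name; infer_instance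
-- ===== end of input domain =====

-- B replaces A's whitespace-tokenize-and-scan-tokens loop with one str.find for the first
-- opening parenthesis plus a short backward scan to the preceding whitespace (objective: simpler).

-- ===== PORT A =====
-- the loop 'for line in lines: if "(" in line: return line[:line.find("(")]'; fall-through returns ''
def getNameLoopA : List String → String
  | [] => ""
  | line :: rest =>
    if PySem.Str.isIn "(" line then PySem.Str.slice line none (some (PySem.Str.find line "("))
    else getNameLoopA rest

def get_instruction_name (enum : String) : String :=
  -- read_from_index = -2; if '*/' in enum: read_from_index = enum.index('*/')
  -- (enum.index('*/') is guarded by the membership test, so PySem.Str.find is exact here)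
  let read_from_index : Int := if PySem.Str.isIn "*/" enum then PySem.Str.find enum "*/" else -2
  let lines := PySem.Str.split₀ (PySem.Str.slice enum (some (read_from_index + 2)) none)
  getNameLoopA lines

-- ===== PORT B =====
-- 'while j > 0 and not s[j - 1].isspace(): j -= 1'.  s[j - 1] is always in range here
-- (1 ≤ j ≤ initial p < len(s)), so the getD default is never read.
def getNameBack (s : List Char) : Nat → Nat
  | 0 => 0
  | j + 1 => if PySem.Chars.isspace (s.getD j ' ') then j + 1 else getNameBack s j

def get_instruction_name_alt (enum : String) : String :=
  let i := PySem.Str.find enum "*/"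
  let s := if i ≠ -1 then PySem.Str.slice enum (some (i + 2)) none else enum
  let p := PySem.Str.find s "("
  if p = -1 then ""
  else
    let j := getNameBack s.toList p.toNat
    PySem.Str.slice s (some (j : Int)) (some p)

-- ===== PRECONDITION & SPEC =====
def Spec_get_instruction_name (enum : String) (out : String) : Prop := out = get_instruction_name_alt enum
instance (enum : String) (out : String) : Decidable (Spec_get_instruction_name enum out) := by unfold Spec_get_instruction_name; infer_instance

-- ===== CLAIM (what is proved, stated in full; the proofs are below) =====
def Claim_equal_get_instruction_name : Prop := ∀ (enum : String), Dom_get_instruction_name enum → Spec_get_instruction_name enum (get_instruction_name enum)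

-- ===== LEMMAS AND PROOFS =====

-- A's token loop, on the List-Char side (bridged to getNameLoopA by pvLoopA_bridge)
def pvLoopC : List (List Char) → List Char
  | [] => []
  | l :: rest =>
    if PySem.Chars.isIn ['('] l then PySem.Chars.slice l none (some (PySem.Chars.find l ['(']))
    else pvLoopC rest

-- common reference: one left-to-right scan keeping the reversed current token in acc
def pvScan : List Char → List Char → List Char
  | _, [] => []
  | acc, c :: rest =>
    if c = '(' then acc.reverse
    else if PySem.Chars.isspace c then pvScan [] rest
    else pvScan (c :: acc) rest

theorem pv_singleton_prefix (a : Char) (l : List Char) : ([a] <+: l) ↔ l.head? = some a := by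
  cases l with
  | nil => simp
  | cons b t => simp [List.cons_prefix_cons, eq_comm]

theorem pv_first_occ {a : Char} {l : List Char} (h : a ∈ l) :
    ∃ u v, l = u ++ a :: v ∧ a ∉ u := by
  induction l with
  | nil => cases h
  | cons c t ih =>
    by_cases hc : c = a
    · exact ⟨[], t, by simp [hc], by simp⟩
    · rcases ih (by rcases List.mem_cons.mp h with h' | h'; exact absurd h'.symm hc; exact h') with ⟨u, v, rfl, hu⟩
      exact ⟨c :: u, v, rfl, by simp [hu]; exact fun e => hc e.symm⟩

theorem pv_find_paren (u v : List Char) (h : '(' ∉ u) :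
    PySem.Chars.find (u ++ '(' :: v) ['('] = (u.length : Int) := by
  set s := u ++ '(' :: v with hs
  have hne : PySem.Chars.find s ['('] ≠ -1 :=
    (PySem.Chars.find_ne_neg_one_iff _ _).mpr ((List.singleton_infix_iff _ _).mpr (by simp [hs]))
  have hff : PySem.Chars.findFrom s ['('] ((0 : Nat) : Int) ≠ -1 := by
    simpa [PySem.Chars.findFrom_zero] using hne
  obtain ⟨h0, hpre, hmin⟩ := PySem.Chars.findFrom_natCast_spec s ['('] 0 (Nat.zero_le _) hff
  simp only [Nat.cast_zero, PySem.Chars.findFrom_zero] at h0 hpre hmin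
  set n := (PySem.Chars.find s ['(']).toNat with hn
  have hle : n ≤ u.length := by
    by_contra hgt
    exact hmin u.length (Nat.zero_le _) (by omega)
      (by rw [hs, List.drop_left]; exact (pv_singleton_prefix _ _).mpr rfl)
  have hnu : n = u.length := by
    rcases Nat.lt_or_ge n u.length with hlt | hge
    · exfalso
      have hp := (pv_singleton_prefix _ _).mp hpre
      rw [List.head?_drop, hs, List.getElem?_append_left hlt] at hp
      rw [List.getElem?_eq_getElem hlt, Option.some_inj] at hp
      exact h (hp ▸ List.getElem_mem hlt)
    · omega
  have : PySem.Chars.find s ['('] = (n : Int) := by omega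
  rw [this, hnu]

theorem pv_isIn_paren_true {l : List Char} (h : '(' ∈ l) : PySem.Chars.isIn ['('] l = true :=
  (PySem.Chars.isIn_iff_infix _ _).mpr ((List.singleton_infix_iff _ _).mpr h)

theorem pv_isIn_paren_false {l : List Char} (h : '(' ∉ l) : PySem.Chars.isIn ['('] l = false := by
  rw [PySem.Chars.isIn_eq_false_iff]
  exact fun hi => h ((List.singleton_infix_iff _ _).mp hi)

theorem pv_sliceFind (u v : List Char) (h : '(' ∉ u) :
    PySem.Chars.slice (u ++ '(' :: v) none (some (PySem.Chars.find (u ++ '(' :: v) ['('])) = u := by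
  rw [pv_find_paren u v h]
  simp only [PySem.Chars.slice, PySem.List.slice_to_natCast]
  exact List.take_left ..

theorem pv_takeWhile_stop {α : Type} (p : α → Bool) (X Y : List α) {c : α} (hc : p c = false) :
    (X ++ c :: Y).takeWhile p = X.takeWhile p := by
  rw [List.takeWhile_append]
  split
  · next hlen =>
    have hX : X.takeWhile p = X := (List.takeWhile_prefix p).eq_of_length hlen
    simp [hc, hX]
  · rfl

theorem pv_takeWhile_paren (u v : List Char) (h : '(' ∉ u) :
    (u ++ '(' :: v).takeWhile (fun c => c != '(') = u := by
  rw [pv_takeWhile_stop _ _ _ (by simp)]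
  exact List.takeWhile_eq_self_iff.mpr (fun a ha => by simp; exact fun e => h (e ▸ ha))

theorem pv_loopC_cons_found (l : List Char) (T : List (List Char)) (h : '(' ∈ l) :
    pvLoopC (l :: T) = l.takeWhile (fun c => c != '(') := by
  obtain ⟨u, v, rfl, hu⟩ := pv_first_occ h
  show pvLoopC ((u ++ '(' :: v) :: T) = _
  rw [pvLoopC, pv_isIn_paren_true h, if_pos rfl, pv_sliceFind u v hu, pv_takeWhile_paren u v hu]

theorem pv_go_acc (s : List Char) : ∀ (cur : List Char) (acc : List (List Char)),
    PySem.Chars.split₀.go s cur acc = acc.reverse ++ PySem.Chars.split₀.go s cur [] := by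
  induction s with
  | nil =>
    intro cur acc
    rw [PySem.Chars.split₀.go, PySem.Chars.split₀.go]
    split <;> simp
  | cons c rest ih =>
    intro cur acc
    rw [PySem.Chars.split₀.go]
    conv_rhs => rw [PySem.Chars.split₀.go]
    split
    · split
      · exact ih [] acc
      · rw [ih [] (cur.reverse :: acc), ih [] [cur.reverse]]
        simp
    · exact ih (c :: cur) acc

theorem pv_loopC_found (s : List Char) : ∀ (cur : List Char), '(' ∈ cur →
    pvLoopC (PySem.Chars.split₀.go s cur []) = cur.reverse.takeWhile (fun c => c != '(') := by
  induction s with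
  | nil =>
    intro cur h
    rw [PySem.Chars.split₀.go]
    have : cur.isEmpty = false := by cases cur <;> simp_all
    rw [this]
    simp only [Bool.false_eq_true, if_false, List.reverse_cons, List.reverse_nil, List.nil_append]
    exact pv_loopC_cons_found _ _ (by simpa using h)
  | cons c rest ih =>
    intro cur h
    rw [PySem.Chars.split₀.go]
    have : cur.isEmpty = false := by cases cur <;> simp_all
    split
    · rw [this]
      simp only [Bool.false_eq_true, if_false]
      rw [pv_go_acc]
      have hmem : '(' ∈ cur.reverse := by simpa using h
      have hcons : (cur.reverse :: ([] : List (List Char))).reverse ++ PySem.Chars.split₀.go rest [] []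
          = cur.reverse :: PySem.Chars.split₀.go rest [] [] := by simp
      rw [hcons]
      exact pv_loopC_cons_found _ _ hmem
    · rw [ih (c :: cur) (List.mem_cons_of_mem _ h)]
      have hmem : '(' ∈ cur.reverse := by simpa using h
      obtain ⟨u, v, hd, hu⟩ := pv_first_occ hmem
      rw [List.reverse_cons, hd, List.append_assoc]
      have : ('(' :: v) ++ [c] = '(' :: (v ++ [c]) := by simp
      rw [this, pv_takeWhile_paren u _ hu, pv_takeWhile_paren u v hu]

theorem pv_loopC_scan (s : List Char) : ∀ (cur : List Char), '(' ∉ cur →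
    pvLoopC (PySem.Chars.split₀.go s cur []) = pvScan cur s := by
  induction s with
  | nil =>
    intro cur h
    rw [PySem.Chars.split₀.go, pvScan]
    split
    · simp [pvLoopC]
    · simp [pvLoopC, pv_isIn_paren_false (show '(' ∉ cur.reverse by simpa using h)]
  | cons c rest ih =>
    intro cur h
    rw [PySem.Chars.split₀.go, pvScan]
    by_cases hpar : c = '('
    · subst hpar
      have hsp : PySem.Chars.isspace '(' = false := by decide
      rw [hsp]
      simp only [Bool.false_eq_true, if_false]
      rw [pv_loopC_found rest ('(' :: cur) (List.mem_cons_self ..)]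
      rw [List.reverse_cons, pv_takeWhile_stop _ _ _ (by simp)]
      exact List.takeWhile_eq_self_iff.mpr (fun a ha => by
        simp only [bne_iff_ne, ne_eq]
        exact fun e => h (by simpa [e] using ha))
    · rw [if_neg hpar]
      split
      · next hsp =>
        split
        · next hemp =>
          simp only [List.isEmpty_iff] at hemp
          subst hemp
          exact ih [] (by simp)
        · rw [pv_go_acc, List.reverse_cons, List.reverse_nil, List.nil_append, List.singleton_append]
          rw [pvLoopC, pv_isIn_paren_false (by simpa using h)]
          simp only [Bool.false_eq_true, if_false]
          exact ih [] (by simp)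
      · exact ih (c :: cur) (by simp [h]; exact fun e => hpar e.symm)

theorem pv_loopA_bridge (ls : List (List Char)) :
    getNameLoopA (ls.map String.ofList) = String.ofList (pvLoopC ls) := by
  induction ls with
  | nil => rfl
  | cons l rest ih =>
    have h1 : "(".toList = ['('] := rfl
    simp only [List.map_cons, getNameLoopA, pvLoopC, PySem.Str.isIn_eq, String.toList_ofList, h1]
    split
    · simp [PySem.Str.slice, PySem.Str.find_eq, h1]
    · exact ih

theorem pv_scan_none (s : List Char) : ∀ (acc : List Char), '(' ∉ s → pvScan acc s = [] := by
  induction s with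
  | nil => intro acc _; rw [pvScan]
  | cons c rest ih =>
    intro acc h
    rw [pvScan, if_neg (by simp at h; exact fun e => h.1 e.symm)]
    split
    · exact ih [] (by simp at h; exact h.2)
    · exact ih _ (by simp at h; exact h.2)

theorem pv_scan_found (u : List Char) (v : List Char) : ∀ (acc : List Char), '(' ∉ u →
    (∀ c ∈ acc, PySem.Chars.isspace c = false) →
    pvScan acc (u ++ '(' :: v)
      = (((u.reverse ++ acc).takeWhile (fun c => !PySem.Chars.isspace c))).reverse := by
  induction u with
  | nil =>
    intro acc _ hacc
    rw [List.nil_append, pvScan, if_pos rfl]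
    rw [List.reverse_nil, List.nil_append,
      List.takeWhile_eq_self_iff.mpr (fun a ha => by simp [hacc a ha])]
  | cons c u' ih =>
    intro acc h hacc
    have hc : c ≠ '(' := by simp at h; exact fun e => h.1 e.symm
    have hu' : '(' ∉ u' := by simp at h; exact h.2
    rw [List.cons_append, pvScan, if_neg hc]
    rw [List.reverse_cons, List.append_assoc]
    split
    · next hsp =>
      rw [ih [] hu' (by simp)]
      rw [List.append_nil, List.singleton_append, pv_takeWhile_stop _ _ _ (by simp [hsp])]
    · next hsp =>
      rw [ih (c :: acc) hu' (by
        intro a ha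
        rcases List.mem_cons.mp ha with rfl | ha'
        · exact Bool.eq_false_iff.mpr hsp
        · exact hacc a ha')]
      rw [List.singleton_append]

theorem pv_back (s : List Char) : ∀ (j : Nat), j ≤ s.length →
    getNameBack s j = j - ((s.take j).reverse.takeWhile (fun c => !PySem.Chars.isspace c)).length := by
  intro j
  induction j with
  | zero => intro _; simp [getNameBack]
  | succ j ih =>
    intro hj
    have hjlt : j < s.length := by omega
    have htake : (s.take (j+1)).reverse = s[j] :: (s.take j).reverse := by
      rw [List.take_add_one, List.getElem?_eq_getElem hjlt]
      simp
    rw [getNameBack, List.getD_eq_getElem s ' ' hjlt, htake]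
    by_cases hsp : PySem.Chars.isspace s[j] = true
    · rw [if_pos hsp]
      simp [hsp]
    · rw [if_neg hsp, ih (by omega)]
      have hr : ((s.take j).reverse.takeWhile (fun c => !PySem.Chars.isspace c)).length ≤ j := by
        have h1 : ((s.take j).reverse.takeWhile (fun c => !PySem.Chars.isspace c)).length
            ≤ (s.take j).reverse.length := (List.takeWhile_prefix _).length_le
        simp at h1
        omega
      simp only [List.takeWhile_cons, Bool.eq_false_iff.mpr hsp]
      simp only [Bool.not_false, if_true, List.length_cons]
      omega

theorem pv_drop_run (u : List Char) (q : Char → Bool) :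
    u.drop (u.length - (u.reverse.takeWhile q).length) = (u.reverse.takeWhile q).reverse := by
  set t := u.reverse.takeWhile q with ht
  set d := u.reverse.dropWhile q with hd
  have hsplit : t ++ d = u.reverse := List.takeWhile_append_dropWhile
  have hu : u = d.reverse ++ t.reverse := by
    rw [← List.reverse_reverse u, ← hsplit, List.reverse_append]
  have hlen2 : t.length + d.length = u.length := by
    simpa using congrArg List.length hsplit
  have hlen : u.length - t.length = d.reverse.length := by
    simp only [List.length_reverse]; omega
  rw [hlen]
  conv_lhs => rw [hu]
  rw [List.drop_left]

theorem pv_core (s : String) :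
    getNameLoopA (PySem.Str.split₀ s)
      = (let p := PySem.Str.find s "("
         if p = -1 then ""
         else PySem.Str.slice s (some ((getNameBack s.toList p.toNat : Nat) : Int)) (some p)) := by
  have hsplit : PySem.Str.split₀ s = (PySem.Chars.split₀ s.toList).map String.ofList := rfl
  have hgo : PySem.Chars.split₀ s.toList = PySem.Chars.split₀.go s.toList [] [] := rfl
  rw [hsplit, pv_loopA_bridge, hgo, pv_loopC_scan s.toList [] (by simp)]
  have hfind : PySem.Str.find s "(" = PySem.Chars.find s.toList ['('] := by
    rw [PySem.Str.find_eq]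
    rfl
  by_cases hmem : '(' ∈ s.toList
  · obtain ⟨u, v, hd, hu⟩ := pv_first_occ hmem
    have hfp : PySem.Str.find s "(" = (u.length : Int) := by
      rw [hfind, hd]; exact pv_find_paren u v hu
    have hne : ¬ PySem.Str.find s "(" = -1 := by rw [hfp]; omega
    simp only [hfp]
    rw [if_neg (by omega)]
    have htonat : ((u.length : Int)).toNat = u.length := Int.toNat_natCast u.length
    rw [htonat]
    have hul : u.length ≤ s.toList.length := by rw [hd]; simp
    have hback : getNameBack s.toList u.length
        = u.length - ((u.reverse.takeWhile (fun c => !PySem.Chars.isspace c))).length := by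
      rw [pv_back s.toList u.length hul, hd, List.take_left]
    rw [hback]
    rw [hd, pv_scan_found u v [] hu (by simp), List.append_nil]
    simp only [PySem.Str.slice, PySem.Chars.slice]
    congr 1
    set t := u.reverse.takeWhile (fun c => !PySem.Chars.isspace c) with ht
    set j := u.length - t.length with hjj
    have hjle : j ≤ u.length := by omega
    have hcast : ((j : Nat) : Int) = (j : Int) := rfl
    rw [PySem.List.slice_natCast (s.toList) j u.length]
    rw [hd, List.drop_append]
    have h0 : j - u.length = 0 := by omega
    rw [h0, List.drop_zero]
    have hlen : (u.drop j).length = u.length - j := List.length_drop ..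
    rw [List.take_left' (by rw [hlen])]
    rw [hjj, pv_drop_run u (fun c => !PySem.Chars.isspace c)]
  · rw [pv_scan_none s.toList [] hmem]
    have : PySem.Str.find s "(" = -1 := by
      rw [hfind]
      by_contra hne
      exact hmem ((List.singleton_infix_iff _ _).mp ((PySem.Chars.find_ne_neg_one_iff _ _).mp hne))
    rw [if_pos this]

theorem pv_main (enum : String) : get_instruction_name enum = get_instruction_name_alt enum := by
  rw [get_instruction_name, get_instruction_name_alt]
  have hisin : PySem.Str.isIn "*/" enum = (PySem.Str.find enum "*/" != -1) := rfl
  by_cases h : PySem.Str.find enum "*/" = -1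
  · simp only [hisin, h, bne_self_eq_false, Bool.false_eq_true, if_false, ne_eq,
      not_true_eq_false]
    have hs : PySem.Str.slice enum (some (-2 + 2)) none = enum := by
      norm_num
      rw [PySem.Str.slice]
      simp only [PySem.Chars.slice, PySem.List.slice_zero_start, PySem.List.slice_none_none]
      exact String.ofList_toList
    rw [hs]
    exact pv_core enum
  · simp only [hisin, bne_iff_ne, ne_eq, h, not_false_iff]
    exact pv_core (PySem.Str.slice enum (some (PySem.Str.find enum "*/" + 2)) none)

-- ===== VERDICT (by name: the statement is the Claim_ definition above) =====
theorem get_instruction_name_spec : Claim_equal_get_instruction_name := by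
  intro enum _
  unfold Spec_get_instruction_name
  exact pv_main enum
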